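-- pv_equiv track=rewrite | github.com/Kshitijkumar15/DSA | learning/StringTransformation.py | string_transformation
-- ===== SOURCE A (Python) =====
-- def cyclic_increment(char, count):
--     char_code = ord(char) - ord('a')
--     new_char_code = (char_code + count) % 26
--     return chr(new_char_code + ord('a'))
--
-- def string_transformation(N, s):
--     q = ''
--     occurrences = {}
--
--     for i in range(N):
--         char = s[i]
--         count = occurrences.get(char, 0)
--         q += cyclic_increment(char, count)
--         occurrences[char] = count + 1
--
--     return q
-- ===== SOURCE B (Python) =====
-- def cyclic_increment(char, count):
--     char_code = ord(char) - ord('a')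
--     new_char_code = (char_code + count) % 26
--     return chr(new_char_code + ord('a'))
--
-- def string_transformation(N, s):
--     # group-by-then-scatter: index every character's occurrence positions first,
--     # then write each occurrence's shifted character directly into its slot
--     occurrences = {}
--     for i in range(N):
--         occurrences.setdefault(s[i], []).append(i)
--     out = [None] * N
--     for char, positions in occurrences.items():
--         for j, p in enumerate(positions):
--             out[p] = cyclic_increment(char, j)
--     return ''.join(out)
-- ===== Notes on version B (the rewrite author's own statement) =====
-- stated objective: alternative
-- what changed: Replaces A's single left-to-right pass with a running occurrence counter by a two-stage group-by-and-scatter: first build an index dict mapping each character to the ordered list of positions where it occurs, then for each character write cyclic_increment(char, j) directly into the preallocated output slot of its j-th occurrence.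
import Mathlib
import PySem

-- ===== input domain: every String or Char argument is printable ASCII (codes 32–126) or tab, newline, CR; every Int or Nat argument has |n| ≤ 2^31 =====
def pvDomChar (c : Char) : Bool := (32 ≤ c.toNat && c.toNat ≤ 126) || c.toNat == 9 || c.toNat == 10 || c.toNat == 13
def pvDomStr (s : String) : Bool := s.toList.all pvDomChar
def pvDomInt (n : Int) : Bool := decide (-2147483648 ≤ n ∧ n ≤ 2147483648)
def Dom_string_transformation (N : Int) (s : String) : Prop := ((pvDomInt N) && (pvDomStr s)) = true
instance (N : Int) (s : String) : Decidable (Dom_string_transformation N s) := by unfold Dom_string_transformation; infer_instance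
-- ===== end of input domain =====

-- B replaces A's single counting pass by a group-by index of occurrence positions followed by a scatter into a preallocated buffer (alternative decomposition, same cost).

-- ===== PORT A =====
def cyclic_increment (char : Char) (count : Int) : Char :=
  let char_code : Int := (char.toNat : Int) - 97
  let new_char_code : Int := PySem.Int.mod (char_code + count) 26
  Char.ofNat (new_char_code + 97).toNat

def string_transformation (N : Int) (s : String) : String :=
  let res := (PySem.List.pyRange 0 N 1).foldl
    (fun (st : List Char × PySem.Dict Char Int) i =>
      let char := (PySem.Str.pyGet? s i).getD ' '
      let count := st.2.getD char 0
      (st.1 ++ [cyclic_increment char count], st.2.insert char (count + 1)))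
    ([], PySem.Dict.empty)
  String.ofList res.1

-- ===== PORT B =====
def cyclic_increment_b (char : Char) (count : Int) : Char :=
  let char_code : Int := (char.toNat : Int) - 97
  let new_char_code : Int := PySem.Int.mod (char_code + count) 26
  Char.ofNat (new_char_code + 97).toNat

def string_transformation_alt (N : Int) (s : String) : String :=
  -- occurrences.setdefault(s[i], []).append(i)  =  modify at key s[i] with default []
  let occurrences := (PySem.List.pyRange 0 N 1).foldl
    (fun (d : PySem.Dict Char (List Int)) i =>
      d.modify ((PySem.Str.pyGet? s i).getD ' ') [] (fun l => l ++ [i]))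
    PySem.Dict.empty
  -- out = [None] * N; under Pre_ every cell is written before the join, so the placeholder is never read
  let out0 : List Char := List.replicate N.toNat ' '
  -- out[p] = cyclic_increment(char, j); p is always a valid non-negative index here, where set p.toNat is exact
  let out := occurrences.items.foldl
    (fun (o : List Char) (cp : Char × List Int) =>
      (PySem.List.enumerate cp.2).foldl
        (fun (o : List Char) (jp : Int × Int) => o.set jp.2.toNat (cyclic_increment_b cp.1 jp.1)) o)
    out0
  String.ofList out

-- ===== PRECONDITION & SPEC =====
-- Pre_ excludes exactly N > len(s), where A's s[i] raises IndexError (B raises there too).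
def Pre_string_transformation (N : Int) (s : String) : Prop := N ≤ (s.toList.length : Int)
instance (N : Int) (s : String) : Decidable (Pre_string_transformation N s) := by unfold Pre_string_transformation; infer_instance
def pvWitness_string_transformation : Int × String := (4, "abca")

def Spec_string_transformation (N : Int) (s : String) (out : String) : Prop := out = string_transformation_alt N s
instance (N : Int) (s : String) (out : String) : Decidable (Spec_string_transformation N s out) := by unfold Spec_string_transformation; infer_instance

-- ===== CLAIM (what is proved, stated in full; the proofs are below) =====
def Claim_equal_string_transformation : Prop := ∀ (N : Int) (s : String), Dom_string_transformation N s → Pre_string_transformation N s → Spec_string_transformation N s (string_transformation N s)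

-- ===== LEMMAS AND PROOFS =====

def pvG (t : List Char) (k : Nat) : Char :=
  cyclic_increment (t.getD k ' ') (((t.take k).count (t.getD k ' ') : Int))

def pvTarget (t : List Char) (n : Nat) : List Char := (List.range n).map (pvG t)

def pvP (t : List Char) (c : Char) : Nat → Bool := fun i => t.getD i ' ' == c

def pvPos (t : List Char) (n : Nat) (c : Char) : List Nat := (List.range n).filter (pvP t c)

theorem pvFoldA (s : String) (n : Nat) (hn : n ≤ s.toList.length) :
    (PySem.List.pyRange 0 (n : Int) 1).foldl
      (fun (st : List Char × PySem.Dict Char Int) i =>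
        let char := (PySem.Str.pyGet? s i).getD ' '
        let count := st.2.getD char 0
        (st.1 ++ [cyclic_increment char count], st.2.insert char (count + 1)))
      ([], PySem.Dict.empty)
    = (pvTarget s.toList n,
       (s.toList.take n).foldl (fun d c => d.insert c (d.getD c 0 + 1)) PySem.Dict.empty) := by
  induction n with
  | zero => simp [pvTarget]
  | succ n ih =>
    have hn' : n ≤ s.toList.length := by omega
    have hlt : n < s.toList.length := by omega
    have hcast : ((n + 1 : Nat) : Int) = (n : Int) + 1 := by push_cast; ring
    rw [hcast, PySem.List.pyRange_one_succ_right (by positivity), List.foldl_append, ih hn']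
    have hget : (PySem.Str.pyGet? s ((n : Nat) : Int)).getD ' ' = s.toList.getD n ' ' := by
      simp [List.getD_eq_getElem?_getD]
    simp only [List.foldl_cons, List.foldl_nil, hget]
    have htake : s.toList.take (n + 1) = s.toList.take n ++ [s.toList.getD n ' '] := by
      rw [List.take_add_one]
      simp [List.getElem?_eq_getElem hlt]
    simp only [Prod.mk.injEq]
    constructor
    · simp only [pvTarget, List.range_succ, List.map_append]
      simp [pvG, PySem.Dict.getD_foldl_insert_add_one, PySem.Dict.getD_empty]
    · rw [htake, List.foldl_append]
      simp [PySem.Dict.getD_foldl_insert_add_one, PySem.Dict.getD_empty]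

theorem pvCountEq (t : List Char) (c : Char) (p : Nat) (hp : p ≤ t.length) :
    (t.take p).count c = (pvPos t p c).length := by
  induction p with
  | zero => simp [pvPos]
  | succ p ih =>
    have hlt : p < t.length := by omega
    have htake : t.take (p + 1) = t.take p ++ [t.getD p ' '] := by
      rw [List.take_add_one]
      simp [List.getElem?_eq_getElem hlt, List.getD_eq_getElem?_getD]
    rw [htake, List.count_append, ih (by omega)]
    simp only [pvPos, List.range_succ, List.filter_append,
      List.length_append, List.filter_cons, List.filter_nil]
    simp only [pvP, List.count_singleton, List.getD_eq_getElem?_getD]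
    split <;> simp

theorem pvPosIdx (t : List Char) (n : Nat) (c : Char) (k : Nat)
    (hk : k < (pvPos t n c).length) :
    (pvPos t ((pvPos t n c).getD k 0) c).length = k := by
  set ps := pvPos t n c with hps
  set p := ps.getD k 0 with hpdef
  have hgetk : ps[k] = p := by rw [hpdef, List.getD_eq_getElem _ _ hk]
  have hmem : p ∈ ps := hgetk ▸ List.getElem_mem hk
  have hppred : pvP t c p = true := List.of_mem_filter hmem
  have hpn : p < n := List.mem_range.mp (List.mem_of_mem_filter hmem)
  have hsplit : ps = pvPos t p c ++ (((List.range n).drop p).filter (pvP t c)) := by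
    rw [hps]; unfold pvPos
    conv_lhs => rw [← List.take_append_drop p (List.range n)]
    rw [List.filter_append, List.take_range, Nat.min_eq_left hpn.le]
  have hsplit2 : ps = pvPos t p c ++ (p :: ((List.range n).drop (p+1)).filter (pvP t c)) := by
    rw [hsplit, List.drop_eq_getElem_cons (by simpa using hpn)]
    simp [hppred]
  have hlenA : (pvPos t p c).length < ps.length := by
    conv_rhs => rw [hsplit2]
    simp
  have hgetA : ps[(pvPos t p c).length]'hlenA = p := by
    rw [List.getElem_of_eq hsplit2]
    rw [List.getElem_append_right (le_refl _)]
    simp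
  have hnodup : ps.Nodup := List.Nodup.filter _ (List.nodup_range)
  exact (List.Nodup.getElem_inj_iff hnodup).mp (hgetA.trans hgetk.symm)

theorem pvSetFold (target : List Char) (ps : List Nat) :
    ∀ (out : List Char), (∀ p ∈ ps, p < out.length) →
      ((ps.foldl (fun o p => o.set p (target.getD p ' ')) out).length = out.length ∧
       ∀ i, i < out.length →
         (ps.foldl (fun o p => o.set p (target.getD p ' ')) out).getD i ' ' =
           if i ∈ ps then target.getD i ' ' else out.getD i ' ') := by
  induction ps with
  | nil => intro out _; simp
  | cons p rest ih =>
    intro out hin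
    have hp : p < out.length := hin p (List.mem_cons_self)
    have hlen1 : (out.set p (target.getD p ' ')).length = out.length := by simp
    obtain ⟨hl, hvals⟩ := ih (out.set p (target.getD p ' '))
      (fun q hq => by rw [hlen1]; exact hin q (List.mem_cons_of_mem _ hq))
    rw [List.foldl_cons]
    refine ⟨hl.trans hlen1, ?_⟩
    intro i hi
    rw [hvals i (by omega)]
    by_cases hir : i ∈ rest
    · simp [hir]
    · by_cases hip : i = p
      · subst hip
        simp [List.getD_eq_getElem?_getD, hp]
      · have hpi : ¬ p = i := fun h => hip h.symm
        simp only [List.getD_eq_getElem?_getD, List.getElem?_set, if_neg hpi]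
        simp [hir, hip]

theorem pvScatterFold (c : Char) (target : List Char) (ps : List Nat) :
    ∀ (st : Int) (out : List Char),
      (∀ k : Nat, k < ps.length → cyclic_increment_b c (st + k) = target.getD (ps.getD k 0) ' ') →
      (PySem.List.enumerate (ps.map (fun i : Nat => (i : Int))) st).foldl
        (fun (o : List Char) (jp : Int × Int) => o.set jp.2.toNat (cyclic_increment_b c jp.1)) out
      = ps.foldl (fun (o : List Char) (p : Nat) => o.set p (target.getD p ' ')) out := by
  induction ps with
  | nil => intro st out _; rfl
  | cons p rest ih =>
    intro st out hv
    rw [List.map_cons, PySem.List.enumerate_cons, List.foldl_cons, List.foldl_cons]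
    have h0 : cyclic_increment_b c st = target.getD p ' ' := by
      have := hv 0 (by simp)
      simpa using this
    rw [ih (st + 1) _ ?_]
    · simp [h0]
    · intro k hk
      have := hv (k + 1) (by simp; omega)
      have harith : st + 1 + (k : Int) = st + ((k + 1 : Nat) : Int) := by push_cast; ring
      rw [harith]
      simpa using this

theorem pvScatterOne (t : List Char) (n : Nat) (hn : n ≤ t.length) (c : Char)
    (out : List Char) (hlen : out.length = n) :
    ((PySem.List.enumerate ((pvPos t n c).map (fun i : Nat => (i : Int)))).foldl
        (fun (o : List Char) (jp : Int × Int) => o.set jp.2.toNat (cyclic_increment_b c jp.1)) out).length = n ∧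
    ∀ i, i < n →
      ((PySem.List.enumerate ((pvPos t n c).map (fun i : Nat => (i : Int)))).foldl
        (fun (o : List Char) (jp : Int × Int) => o.set jp.2.toNat (cyclic_increment_b c jp.1)) out).getD i ' ' =
        if t.getD i ' ' = c then (pvTarget t n).getD i ' ' else out.getD i ' ' := by
  have hv : ∀ k : Nat, k < (pvPos t n c).length →
      cyclic_increment_b c ((0 : Int) + k) = (pvTarget t n).getD ((pvPos t n c).getD k 0) ' ' := by
    intro k hk
    set p := (pvPos t n c).getD k 0 with hpdef
    have hgetk : (pvPos t n c)[k] = p := by rw [hpdef, List.getD_eq_getElem _ _ hk]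
    have hmem : p ∈ pvPos t n c := hgetk ▸ List.getElem_mem hk
    have hceq : t.getD p ' ' = c := by
      have := List.of_mem_filter hmem
      simpa [pvP] using this
    have hpn : p < n := List.mem_range.mp (List.mem_of_mem_filter hmem)
    have hcount : ((t.take p).count c : Nat) = k := by
      rw [pvCountEq t c p (by omega)]
      exact pvPosIdx t n c k hk
    rw [pvTarget, PySem.List.getD_map_range _ _ _ _ hpn]
    rw [pvG, hceq, hcount]
    norm_num
    rfl
  rw [pvScatterFold c (pvTarget t n) (pvPos t n c) 0 out hv]
  have hrange : ∀ p ∈ pvPos t n c, p < out.length := by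
    intro p hp
    rw [hlen]
    exact List.mem_range.mp (List.mem_of_mem_filter hp)
  obtain ⟨h1, h2⟩ := pvSetFold (pvTarget t n) (pvPos t n c) out hrange
  refine ⟨h1.trans hlen, ?_⟩
  intro i hi
  rw [h2 i (by omega)]
  have hmem : (i ∈ pvPos t n c) ↔ (t.getD i ' ' = c) := by
    simp [pvPos, pvP, List.mem_filter, List.mem_range, hi]
  by_cases hc : t.getD i ' ' = c
  · rw [if_pos (hmem.mpr hc), if_pos hc]
  · rw [if_neg (fun h => hc (hmem.mp h)), if_neg hc]

theorem pvOuter (t : List Char) (n : Nat) (hn : n ≤ t.length) (K : List Char) :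
    ∀ (out : List Char), out.length = n →
      ((K.foldl (fun o c =>
          (PySem.List.enumerate ((pvPos t n c).map (fun i : Nat => (i : Int)))).foldl
            (fun (o : List Char) (jp : Int × Int) => o.set jp.2.toNat (cyclic_increment_b c jp.1)) o) out).length = n ∧
       ∀ i, i < n →
         (K.foldl (fun o c =>
            (PySem.List.enumerate ((pvPos t n c).map (fun i : Nat => (i : Int)))).foldl
              (fun (o : List Char) (jp : Int × Int) => o.set jp.2.toNat (cyclic_increment_b c jp.1)) o) out).getD i ' ' =
           if t.getD i ' ' ∈ K then (pvTarget t n).getD i ' ' else out.getD i ' ') := by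
  induction K with
  | nil => intro out hlen; simpa using hlen
  | cons c rest ih =>
    intro out hlen
    rw [List.foldl_cons]
    obtain ⟨h1, h2⟩ := pvScatterOne t n hn c out hlen
    obtain ⟨hl, hvals⟩ := ih _ h1
    refine ⟨hl, ?_⟩
    intro i hi
    rw [hvals i hi, h2 i hi]
    simp only [List.mem_cons]
    by_cases hr : t.getD i ' ' ∈ rest
    · rw [if_pos hr, if_pos (Or.inr hr)]
    · by_cases hc : t.getD i ' ' = c
      · rw [if_neg hr, if_pos hc, if_pos (Or.inl hc)]
      · rw [if_neg hr, if_neg hc, if_neg (by tauto)]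

theorem pvDictGetD (s : String) (n : Nat) (c : Char) :
    ((PySem.List.pyRange 0 (n : Int) 1).foldl
      (fun (d : PySem.Dict Char (List Int)) i =>
        d.modify ((PySem.Str.pyGet? s i).getD ' ') [] (fun l => l ++ [i]))
      PySem.Dict.empty).getD c []
    = (pvPos s.toList n c).map (fun i : Nat => (i : Int)) := by
  rw [PySem.List.pyRange_zero_natCast, List.foldl_map]
  have hstep : ∀ (init : PySem.Dict Char (List Int)),
      (List.range n).foldl
        (fun d (i : Nat) => d.modify ((PySem.Str.pyGet? s (i : Int)).getD ' ') [] (fun l => l ++ [(i : Int)])) init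
      = ((List.range n).map (fun i : Nat => ((PySem.Str.pyGet? s (i : Int)).getD ' ', (i : Int)))).foldl
          (fun d p => d.modify p.1 [] (fun l => l ++ [p.2])) init := by
    intro init; rw [List.foldl_map]
  rw [hstep, PySem.Dict.getD_foldl_modify_append, PySem.Dict.getD_empty, List.nil_append,
    List.filter_map, List.map_map]
  unfold pvPos pvP
  have hpred : ((fun (p : Char × Int) => p.1 == c) ∘ fun i : Nat => ((PySem.Str.pyGet? s (i : Int)).getD ' ', (i : Int)))
      = (fun i : Nat => s.toList.getD i ' ' == c) := by
    funext i
    simp [List.getD_eq_getElem?_getD]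
  rw [hpred]
  exact List.map_congr_left (fun i _ => rfl)

theorem pvAltEq (s : String) (n : Nat) (hn : n ≤ s.toList.length) :
    string_transformation_alt (n : Int) s = String.ofList (pvTarget s.toList n) := by
  unfold string_transformation_alt
  dsimp only
  set d := (PySem.List.pyRange 0 (n : Int) 1).foldl
    (fun (d : PySem.Dict Char (List Int)) i =>
      d.modify ((PySem.Str.pyGet? s i).getD ' ') [] (fun l => l ++ [i]))
    PySem.Dict.empty with hd
  have hnodup : d.keys.Nodup := by
    rw [hd]
    exact PySem.Dict.nodup_keys_foldl_modify_key (PySem.List.pyRange 0 (n : Int) 1)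
      (fun i => (PySem.Str.pyGet? s i).getD ' ') ([] : List Int)
      (fun _ i => (fun l => l ++ [i])) PySem.Dict.empty List.nodup_nil
  have hkeys : d.keys = PySem.Set.update (PySem.Dict.empty : PySem.Dict Char (List Int)).keys
      ((PySem.List.pyRange 0 (n : Int) 1).map (fun i => (PySem.Str.pyGet? s i).getD ' ')) := by
    rw [hd]
    exact PySem.Dict.keys_foldl_modify_key (PySem.List.pyRange 0 (n : Int) 1)
      (fun i => (PySem.Str.pyGet? s i).getD ' ') ([] : List Int)
      (fun _ i => (fun l => l ++ [i])) PySem.Dict.empty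
  have hitems : d.items = d.keys.map (fun c => (c, d.getD c [])) :=
    PySem.Dict.items_eq_map_keys d hnodup ([] : List Int)
  have hgetD : ∀ c, d.getD c [] = (pvPos s.toList n c).map (fun i : Nat => (i : Int)) := by
    intro c
    rw [hd]
    exact pvDictGetD s n c
  rw [hitems, List.foldl_map]
  simp only [hgetD]
  obtain ⟨hlen, hvals⟩ := pvOuter s.toList n hn d.keys
    (List.replicate ((n : Int)).toNat ' ') (by simp)
  have hcov : ∀ i, i < n → s.toList.getD i ' ' ∈ d.keys := by
    intro i hi
    rw [hkeys]
    refine (PySem.Set.mem_update _ _ _).mpr (Or.inr ?_)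
    refine List.mem_map.mpr ⟨(i : Int), ?_, ?_⟩
    · exact PySem.List.mem_pyRange_one.mpr ⟨by positivity, by exact_mod_cast hi⟩
    · simp [List.getD_eq_getElem?_getD]
  apply congrArg String.ofList
  apply List.ext_getElem (by rw [hlen]; simp [pvTarget])
  intro i h1 h2
  have hi : i < n := by rw [hlen] at h1; exact h1
  have hL := hvals i hi
  rw [if_pos (hcov i hi)] at hL
  rw [← List.getD_eq_getElem _ ' ' h1, hL, List.getD_eq_getElem _ ' ' h2]

-- ===== VERDICT (by name: the statement is the Claim_ definition above) =====
theorem string_transformation_spec : Claim_equal_string_transformation := by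
  intro N s _ hPre
  unfold Spec_string_transformation
  by_cases hN : 0 ≤ N
  · have hNn : N = ((N.toNat : Nat) : Int) := by omega
    have hn : N.toNat ≤ s.toList.length := by
      unfold Pre_string_transformation at hPre; omega
    rw [hNn, pvAltEq s N.toNat hn]
    unfold string_transformation
    rw [pvFoldA s N.toNat hn]
  · have hempty : PySem.List.pyRange 0 N 1 = [] := by
      rw [List.eq_nil_iff_forall_not_mem]
      intro x hx
      rw [PySem.List.mem_pyRange_one] at hx
      omega
    have hz : N.toNat = 0 := by omega
    simp only [string_transformation, string_transformation_alt, hempty, hz,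
      List.foldl_nil, List.replicate_zero]
    rfl
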